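-- pv_equiv track=rewrite | github.com/gustavoapc/Tracer-and-ReverseTracer | Tracer-and-ReverseTracer-main/trace-route/packets.py | calcula_checksum
-- ===== SOURCE A (Python) =====
-- def calcula_checksum(data):
--     length = len(data)
--     sum_ = 0
--     count_to = (length // 2) * 2
--     count = 0
--
--     while count < count_to:
--         this_val = data[count + 1] * 256 + data[count]
--         sum_ += this_val
--         sum_ &= 0xffffffff
--         count += 2
--
--     if count_to < length:
--         sum_ += data[length - 1]
--         sum_ &= 0xffffffff
--
--     sum_ = (sum_ >> 16) + (sum_ & 0xffff)
--     sum_ += (sum_ >> 16)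
--     result = ~sum_ & 0xffff
--     result = result >> 8 | ((result & 0xff) << 8)
--     return result
-- ===== SOURCE B (Python) =====
-- def calcula_checksum(data):
--     lo = hi = 0
--     for i, b in enumerate(data):
--         if i % 2 == 0:
--             lo += b
--         else:
--             hi += b
--     total = (lo + 256 * hi) & 0xffffffff
--     total = (total >> 16) + (total & 0xffff)
--     total += total >> 16
--     res = ~total & 0xffff
--     return ((res & 0xff) << 8) | (res >> 8)
-- ===== Notes on version B (the rewrite author's own statement) =====
-- stated objective: alternative
-- what changed: B replaces A's word-at-a-time index loop with per-word 32-bit masking by a single byte-wise pass that accumulates low/high byte sums by index parity and applies one 32-bit mask to lo + 256*hi before the usual carry fold, complement and byte swap.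
import Mathlib
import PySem

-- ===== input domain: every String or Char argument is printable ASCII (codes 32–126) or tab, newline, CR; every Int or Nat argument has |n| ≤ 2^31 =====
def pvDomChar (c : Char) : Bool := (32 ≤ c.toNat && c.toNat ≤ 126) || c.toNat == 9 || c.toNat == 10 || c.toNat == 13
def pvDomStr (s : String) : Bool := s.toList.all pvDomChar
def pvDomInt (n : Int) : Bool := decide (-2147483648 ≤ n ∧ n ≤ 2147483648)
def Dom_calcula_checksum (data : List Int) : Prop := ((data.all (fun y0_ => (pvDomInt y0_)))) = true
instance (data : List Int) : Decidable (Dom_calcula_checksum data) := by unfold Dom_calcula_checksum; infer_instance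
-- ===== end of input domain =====

-- B accumulates low/high byte sums by index parity in one byte-wise pass and masks once,
-- instead of A's word-at-a-time index loop with per-word 32-bit masking (alternative decomposition, same result).

-- ===== PORT A =====
def calcula_checksum (data : List Int) : Int :=
  let length : Int := data.length
  let count_to : Int := PySem.Int.floordiv length 2 * 2
  -- while count < count_to, count += 2  ⇒ fold over range(0, count_to, 2)
  let sum1 : Int :=
    (PySem.List.pyRange 0 count_to 2).foldl
      (fun sum_ count =>
        let this_val := PySem.List.pyGetD data (count + 1) 0 * 256 + PySem.List.pyGetD data count 0
        PySem.Int.band (sum_ + this_val) 0xffffffff)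
      0
  let sum2 : Int :=
    if count_to < length then PySem.Int.band (sum1 + PySem.List.pyGetD data (length - 1) 0) 0xffffffff
    else sum1
  let sum3 : Int := (sum2 >>> 16) + PySem.Int.band sum2 0xffff
  let sum4 : Int := sum3 + (sum3 >>> 16)
  let result : Int := PySem.Int.band (Int.not sum4) 0xffff
  PySem.Int.bor (result >>> 8) (PySem.Int.band result 0xff <<< 8)

-- ===== PORT B =====
def calcula_checksum_alt (data : List Int) : Int :=
  let p : Int × Int :=
    (PySem.List.enumerate data).foldl
      (fun (p : Int × Int) ib =>
        if PySem.Int.mod ib.1 2 == 0 then (p.1 + ib.2, p.2) else (p.1, p.2 + ib.2))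
      (0, 0)
  let total0 : Int := PySem.Int.band (p.1 + 256 * p.2) 0xffffffff
  let total1 : Int := (total0 >>> 16) + PySem.Int.band total0 0xffff
  let total2 : Int := total1 + (total1 >>> 16)
  let res : Int := PySem.Int.band (Int.not total2) 0xffff
  PySem.Int.bor (PySem.Int.band res 0xff <<< 8) (res >>> 8)

-- ===== PRECONDITION & SPEC =====
def Spec_calcula_checksum (data : List Int) (out : Int) : Prop := out = calcula_checksum_alt data
instance (data : List Int) (out : Int) : Decidable (Spec_calcula_checksum data out) := by unfold Spec_calcula_checksum; infer_instance

-- ===== CLAIM (what is proved, stated in full; the proofs are below) =====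
def Claim_equal_calcula_checksum : Prop := ∀ (data : List Int), Dom_calcula_checksum data → Spec_calcula_checksum data (calcula_checksum data)

-- ===== LEMMAS AND PROOFS =====

-- sum of the bytes at even (pvEsum) and odd (pvOsum) positions
mutual
def pvEsum : List Int → Int
  | [] => 0
  | x :: xs => x + pvOsum xs
def pvOsum : List Int → Int
  | [] => 0
  | _ :: xs => pvEsum xs
end

theorem band_mask (x : Int) : PySem.Int.band x 0xffffffff = x % 4294967296 := by
  unfold PySem.Int.band
  have hmask : ∀ n : Nat, n &&& 4294967295 = n % 4294967296 := by
    intro n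
    have := Nat.and_two_pow_sub_one_eq_mod n 32
    norm_num at this; omega
  have e : (0xffffffff : Int).toNat = 4294967295 := rfl
  split
  · rw [e, hmask]; omega
  · rw [e, Nat.and_comm, hmask]; omega

-- B's enumerate fold computes the parity sums (with a running start index of known parity)
theorem foldB (xs : List Int) : ∀ (a b s : Int),
    (PySem.List.enumerate xs s).foldl
      (fun (p : Int × Int) ib =>
        if PySem.Int.mod ib.1 2 == 0 then (p.1 + ib.2, p.2) else (p.1, p.2 + ib.2)) (a, b)
    = if PySem.Int.mod s 2 == 0 then (a + pvEsum xs, b + pvOsum xs)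
      else (a + pvOsum xs, b + pvEsum xs) := by
  induction xs with
  | nil => intro a b s; simp [PySem.List.enumerate, pvEsum, pvOsum]
  | cons x t ih =>
    intro a b s
    simp only [PySem.List.enumerate, List.foldl_cons, ih, pvEsum, pvOsum]
    by_cases h : s % 2 = 0
    · have h1 : (s + 1) % 2 ≠ 0 := by omega
      simp [h, h1]
      ring
    · have h1 : (s + 1) % 2 = 0 := by omega
      simp [h, h1]
      ring

-- the 16-bit word read by A at word index k
def pvWord (data : List Int) (k : Nat) : Int :=
  PySem.List.pyGetD data (2 * (k : Int) + 1) 0 * 256 + PySem.List.pyGetD data (2 * (k : Int)) 0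

-- shifting one element off the front shifts pyGetD indices by one (natural indices)
theorem pyGetD_cons (x : Int) (xs : List Int) (n : Nat) (d : Int) :
    PySem.List.pyGetD (x :: xs) ((n : Int) + 1) d = PySem.List.pyGetD xs (n : Int) d := by
  have h0 : (0:Int) ≤ (n:Int) + 1 := by positivity
  simp [PySem.List.pyGetD, PySem.List.pyGet?, PySem.List.pyIdx?, h0]
  by_cases h : n < xs.length <;> simp [h]

-- the masked fold is the plain sum, taken mod 2^32
theorem foldMask (g : Int → Int) (ws : List Int) : ∀ (s : Int),
    ws.foldl (fun s w => PySem.Int.band (s + g w) 0xffffffff) (s % 4294967296)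
    = (s + (ws.map g).sum) % 4294967296 := by
  induction ws with
  | nil => intro s; simp
  | cons w t ih =>
    intro s
    simp only [List.foldl_cons, List.map_cons, List.sum_cons]
    have h1 : PySem.Int.band (s % 4294967296 + g w) 0xffffffff = (s + g w) % 4294967296 := by
      rw [band_mask]; omega
    rw [h1, ih]
    ring_nf

-- the word sum over the even prefix plus the odd tail byte is the parity-split sum
theorem sumLem : ∀ (data : List Int),
    (((List.range (data.length / 2)).map (pvWord data)).sum
      + (if data.length % 2 = 1 then PySem.List.pyGetD data ((data.length : Int) - 1) 0 else 0))
    = pvEsum data + 256 * pvOsum data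
  | [] => by simp [pvEsum, pvOsum]
  | [x] => by simp [pvEsum, pvOsum, pysem]
  | x :: y :: rest => by
    have ih := sumLem rest
    have hdiv : (x :: y :: rest).length / 2 = rest.length / 2 + 1 := by simp; omega
    have hmod : (x :: y :: rest).length % 2 = rest.length % 2 := by simp; omega
    rw [hdiv, List.range_succ_eq_map, List.map_cons, List.map_map, List.sum_cons]
    have h0 : pvWord (x :: y :: rest) 0 = y * 256 + x := by
      simp [pvWord, pysem]
    have hshift : ∀ k : Nat, pvWord (x :: y :: rest) (Nat.succ k) = pvWord rest k := by
      intro k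
      unfold pvWord
      have e1 : (2 * ((Nat.succ k : Nat) : Int) + 1) = ((2 * k + 2 : Nat) : Int) + 1 := by push_cast; ring
      have e2 : (2 * ((Nat.succ k : Nat) : Int)) = ((2 * k + 1 : Nat) : Int) + 1 := by push_cast; ring
      have e3 : ((2 * k + 2 : Nat) : Int) = ((2 * k + 1 : Nat) : Int) + 1 := by push_cast; ring
      have e4 : ((2 * k + 1 : Nat) : Int) = ((2 * k : Nat) : Int) + 1 := by push_cast; ring
      rw [e1, pyGetD_cons x (y :: rest) (2 * k + 2), e3, pyGetD_cons y rest (2 * k + 1)]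
      rw [e2, pyGetD_cons x (y :: rest) (2 * k + 1), e4, pyGetD_cons y rest (2 * k)]
      push_cast
      ring
    simp only [Function.comp_def, hshift, h0, hmod]
    have htail : (if rest.length % 2 = 1
        then PySem.List.pyGetD (x :: y :: rest) (((x :: y :: rest).length : Int) - 1) 0 else 0)
        = (if rest.length % 2 = 1 then PySem.List.pyGetD rest ((rest.length : Int) - 1) 0 else 0) := by
      by_cases h : rest.length % 2 = 1
      · have hr : 1 ≤ rest.length := by omega
        have e5 : (((x :: y :: rest).length : Int) - 1) = ((rest.length : Nat) : Int) + 1 := by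
          simp only [List.length_cons]; push_cast; ring
        have e6 : ((rest.length : Nat) : Int) = ((rest.length - 1 : Nat) : Int) + 1 := by omega
        rw [if_pos h, if_pos h, e5, pyGetD_cons x (y :: rest) rest.length, e6,
          pyGetD_cons y rest (rest.length - 1)]
        congr 1
        omega
      · simp [h]
    rw [htail]
    have heta : (fun k => pvWord rest k) = pvWord rest := rfl
    try rw [heta]
    by_cases hp : rest.length % 2 = 1
    · rw [if_pos hp] at ih ⊢
      simp only [pvEsum, pvOsum]
      omega
    · rw [if_neg hp] at ih ⊢
      simp only [pvEsum, pvOsum]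
      omega

-- A's accumulated 32-bit sum, in closed form
theorem sumA (data : List Int) :
    (let length : Int := data.length
     let count_to : Int := PySem.Int.floordiv length 2 * 2
     let sum1 : Int :=
       (PySem.List.pyRange 0 count_to 2).foldl
         (fun sum_ count =>
           let this_val := PySem.List.pyGetD data (count + 1) 0 * 256 + PySem.List.pyGetD data count 0
           PySem.Int.band (sum_ + this_val) 0xffffffff)
         0
     if count_to < length then PySem.Int.band (sum1 + PySem.List.pyGetD data (length - 1) 0) 0xffffffff
     else sum1)
    = (pvEsum data + 256 * pvOsum data) % 4294967296 := by
  have hct : PySem.Int.floordiv (data.length : Int) 2 * 2 = ((2 * (data.length / 2) : Nat) : Int) := by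
    have h2 := PySem.Int.floordiv_natCast data.length 2
    push_cast at h2 ⊢
    omega
  have hrange : PySem.List.pyRange 0 ((2 * (data.length / 2) : Nat) : Int) 2
      = (List.range (data.length / 2)).map (fun (k : Nat) => 2 * (k : Int)) := by
    rw [PySem.List.pyRange_of_pos 0 _ (by norm_num)]
    by_cases h : data.length / 2 = 0
    · simp [h]
    · have hpos : (0 : Int) < ((2 * (data.length / 2) : Nat) : Int) := by
        push_cast; omega
      rw [if_pos hpos]
      have hc : ((((2 * (data.length / 2) : Nat) : Int) - 0 + 2 - 1) / 2).toNat = data.length / 2 := by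
        push_cast; omega
      rw [hc]
      simp
  simp only [hct, hrange]
  have hfold := foldMask
    (fun c : Int => PySem.List.pyGetD data (c + 1) 0 * 256 + PySem.List.pyGetD data c 0)
    ((List.range (data.length / 2)).map (fun (k : Nat) => 2 * (k : Int))) 0
  have hw : ((fun c : Int => PySem.List.pyGetD data (c + 1) 0 * 256 + PySem.List.pyGetD data c 0)
      ∘ (fun k : Nat => 2 * (k : Int))) = pvWord data := by
    funext k; simp [pvWord]
  rw [Int.zero_emod] at hfold
  rw [List.map_map, hw, zero_add] at hfold
  rw [hfold]
  have hsum := sumLem data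
  by_cases hodd : data.length % 2 = 1
  · have hlt : ((2 * (data.length / 2) : Nat) : Int) < (data.length : Int) := by push_cast; omega
    rw [if_pos hlt, band_mask]
    rw [if_pos hodd] at hsum
    omega
  · have hnlt : ¬ ((2 * (data.length / 2) : Nat) : Int) < (data.length : Int) := by push_cast; omega
    rw [if_neg hnlt]
    rw [if_neg hodd] at hsum
    omega

-- ===== VERDICT (by name: the statement is the Claim_ definition above) =====
theorem calcula_checksum_spec : Claim_equal_calcula_checksum := by
  intro data _
  unfold Spec_calcula_checksum calcula_checksum calcula_checksum_alt
  have hA := sumA data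
  simp only at hA ⊢
  rw [hA]
  have hB := foldB data 0 0 0
  rw [if_pos (show (PySem.Int.mod (0:Int) 2 == 0) = true from rfl)] at hB
  simp only [zero_add] at hB
  rw [hB, band_mask]
  rw [PySem.Int.bor_comm]
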